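-- pv_equiv track=rewrite | github.com/cqupt-gsy/thinking-in-python | my-projects/CampusTest/Strings.py | adjustBackSentence
-- ===== SOURCE A (Python) =====
-- def adjustBackSentence(wordlist, finalstring):
--     '''
--     将过分分类的单词进行合并
--     :param wordlist: 单词列表
--     :param finalstring: 第一步分类的字符串
--     :return:
--     '''
--     finallist = finalstring.split(' ')
--     firstindex = []
--     middleindex = []
--     finalresult = ''
--     #查找能够组成更长单词的字符串
--     for index in range(len(finallist)):
--         if index+1 < len(finallist):
--             firststring = finallist[index-1] + finallist[index]
--             middlestring =finallist[index-1] + finallist[index] + finallist[index+1]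
--             if wordlist.count(firststring) != 0:
--                 firstindex.append(index)
--                 continue
--             if wordlist.count(middlestring) != 0:
--                 middleindex.append(index)
--                 continue
--         else:
--             tempstring =finallist[index-1] + finallist[index]
--             if wordlist.count(tempstring) != 0:
--                 firstindex.append(index)
--     skipnum = 0
--     #进行合并
--     for index in range(len(finallist)):
--         if skipnum != 0 :
--             skipnum = skipnum - 1
--             continue
--         if middleindex.count(index+1) != 0:
--             if index+2 < len(finallist):
--                 finalresult += finallist[index] + finallist[index+1] + finallist[index+2] + ' '
--                 skipnum = 2
--             else:
--                 finalresult += finallist[index] + finallist[index+1] + ' '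
--                 skipnum = 1
--         elif firstindex.count(index+1) != 0:
--             finalresult += finallist[index] + finallist[index+1] + ' '
--             skipnum = 1
--         else:
--             finalresult += finallist[index] + ' '
--             skipnum = 0
--     return finalresult
-- ===== SOURCE B (Python) =====
-- def adjustBackSentence(wordlist, finalstring):
--     words = set(wordlist)
--     finallist = finalstring.split(' ')
--     n = len(finallist)
--     finalresult = ''
--     i = 0
--     while i < n:
--         if i + 1 < n and finallist[i] + finallist[i + 1] in words:
--             finalresult += finallist[i] + finallist[i + 1] + ' '
--             i += 2
--         elif i + 2 < n and finallist[i] + finallist[i + 1] + finallist[i + 2] in words: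
--             finalresult += finallist[i] + finallist[i + 1] + finallist[i + 2] + ' '
--             i += 3
--         else:
--             finalresult += finallist[i] + ' '
--             i += 1
--     return finalresult
-- ===== Notes on version B (the rewrite author's own statement) =====
-- stated objective: alternative
-- what changed: Replaces the two-phase structure (precompute firstindex/middleindex via wordlist.count per token, then re-scan with a skipnum counter) by a single forward loop that tests the two-word then three-word merge directly against a set of the wordlist and advances the index by 1, 2 or 3.
import Mathlib
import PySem

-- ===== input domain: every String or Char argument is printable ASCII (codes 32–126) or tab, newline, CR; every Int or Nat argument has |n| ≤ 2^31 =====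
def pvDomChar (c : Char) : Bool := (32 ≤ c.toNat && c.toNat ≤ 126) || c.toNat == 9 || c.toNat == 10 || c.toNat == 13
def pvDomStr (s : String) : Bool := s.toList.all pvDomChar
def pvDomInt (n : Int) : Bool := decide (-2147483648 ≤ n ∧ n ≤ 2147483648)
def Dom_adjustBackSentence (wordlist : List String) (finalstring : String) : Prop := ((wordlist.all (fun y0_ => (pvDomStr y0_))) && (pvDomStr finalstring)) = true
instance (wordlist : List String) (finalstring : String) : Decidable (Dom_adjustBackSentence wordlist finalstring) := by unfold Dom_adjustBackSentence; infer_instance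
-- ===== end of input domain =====

-- B replaces A's two-phase index-list construction + skipnum re-scan by a single forward
-- loop testing the merges directly against a set built from wordlist (objective: alternative).

-- finalstring.split(' ') (sep is the non-empty literal ' ', so Python's split never raises)
def pvSplit (s : String) : List String :=
  (PySem.Chars.splitOn s.toList [' ']).map (fun cs => String.ofList cs)

-- ===== PORT A =====
-- finallist[k] for a possibly negative Python index k (the list is nonempty, so in range)
def pvG (f : List String) (k : Int) : String := (PySem.List.pyGet? f k).getD ""

-- first loop body: builds (firstindex, middleindex)
def pvStep1 (wordlist f : List String) (st : List Nat × List Nat) (j : Nat) : List Nat × List Nat :=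
  if j + 1 < f.length then
    let firststring := pvG f ((j : Int) - 1) ++ pvG f (j : Int)
    let middlestring := pvG f ((j : Int) - 1) ++ pvG f (j : Int) ++ pvG f ((j : Int) + 1)
    if PySem.List.count wordlist firststring ≠ 0 then (st.1 ++ [j], st.2)
    else if PySem.List.count wordlist middlestring ≠ 0 then (st.1, st.2 ++ [j])
    else st
  else
    let tempstring := pvG f ((j : Int) - 1) ++ pvG f (j : Int)
    if PySem.List.count wordlist tempstring ≠ 0 then (st.1 ++ [j], st.2) else st

-- second loop body: state (skipnum, finalresult)
def pvStep2 (f : List String) (firstindex middleindex : List Nat) (st : Nat × String) (j : Nat) : Nat × String :=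
  if st.1 ≠ 0 then (st.1 - 1, st.2)
  else if PySem.List.count middleindex (j + 1) ≠ 0 then
    if j + 2 < f.length then
      (2, st.2 ++ pvG f (j : Int) ++ pvG f ((j : Int) + 1) ++ pvG f ((j : Int) + 2) ++ " ")
    else
      (1, st.2 ++ pvG f (j : Int) ++ pvG f ((j : Int) + 1) ++ " ")
  else if PySem.List.count firstindex (j + 1) ≠ 0 then
    (1, st.2 ++ pvG f (j : Int) ++ pvG f ((j : Int) + 1) ++ " ")
  else
    (0, st.2 ++ pvG f (j : Int) ++ " ")

def adjustBackSentence (wordlist : List String) (finalstring : String) : String :=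
  let finallist := pvSplit finalstring
  let fm := (List.range finallist.length).foldl (pvStep1 wordlist finallist) ([], [])
  ((List.range finallist.length).foldl (pvStep2 finallist fm.1 fm.2) (0, "")).2

-- ===== PORT B =====
def pvAltLoop (words : PySem.Set String) (f : List String) (i : Nat) : String :=
  if i < f.length then
    if i + 1 < f.length ∧ PySem.Set.contains words (f.getD i "" ++ f.getD (i+1) "") then
      f.getD i "" ++ f.getD (i+1) "" ++ " " ++ pvAltLoop words f (i+2)
    else if i + 2 < f.length ∧
        PySem.Set.contains words (f.getD i "" ++ f.getD (i+1) "" ++ f.getD (i+2) "") then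
      f.getD i "" ++ f.getD (i+1) "" ++ f.getD (i+2) "" ++ " " ++ pvAltLoop words f (i+3)
    else
      f.getD i "" ++ " " ++ pvAltLoop words f (i+1)
  else ""
termination_by f.length - i
decreasing_by all_goals omega

def adjustBackSentence_alt (wordlist : List String) (finalstring : String) : String :=
  pvAltLoop (PySem.Set.ofList wordlist) (pvSplit finalstring) 0

-- ===== PRECONDITION & SPEC =====
def Spec_adjustBackSentence (wordlist : List String) (finalstring : String) (out : String) : Prop := out = adjustBackSentence_alt wordlist finalstring
instance (wordlist : List String) (finalstring : String) (out : String) : Decidable (Spec_adjustBackSentence wordlist finalstring out) := by unfold Spec_adjustBackSentence; infer_instance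

-- ===== CLAIM (what is proved, stated in full; the proofs are below) =====
def Claim_equal_adjustBackSentence : Prop := ∀ (wordlist : List String) (finalstring : String), Dom_adjustBackSentence wordlist finalstring → Spec_adjustBackSentence wordlist finalstring (adjustBackSentence wordlist finalstring)

-- ===== LEMMAS AND PROOFS =====

-- the uniform "two-word" test of A's first pass (same string in both its branches)
def pvCondF (wordlist f : List String) (j : Nat) : Bool :=
  decide (PySem.List.count wordlist (pvG f ((j : Int) - 1) ++ pvG f (j : Int)) ≠ 0)

def pvCondM (wordlist f : List String) (j : Nat) : Bool :=
  decide (j + 1 < f.length) && !(pvCondF wordlist f j) &&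
  decide (PySem.List.count wordlist
    (pvG f ((j : Int) - 1) ++ pvG f (j : Int) ++ pvG f ((j : Int) + 1)) ≠ 0)

theorem pvStep1_char (wordlist f : List String) (st : List Nat × List Nat) (j : Nat) :
    pvStep1 wordlist f st j =
      (st.1 ++ (if pvCondF wordlist f j then [j] else []),
       st.2 ++ (if pvCondM wordlist f j then [j] else [])) := by
  simp only [pvStep1, pvCondF, pvCondM]
  split_ifs <;> simp_all
  omega

theorem pvFold1_char (wordlist f : List String) (L : List Nat) (fi mi : List Nat) :
    L.foldl (pvStep1 wordlist f) (fi, mi) =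
      (fi ++ L.filter (pvCondF wordlist f), mi ++ L.filter (pvCondM wordlist f)) := by
  induction L generalizing fi mi with
  | nil => simp
  | cons a L ih =>
    simp only [List.foldl_cons, pvStep1_char, List.filter_cons]
    rw [ih]
    by_cases hF : pvCondF wordlist f a <;> by_cases hM : pvCondM wordlist f a <;>
      simp [hF, hM]

theorem pv_count_filter_range (p : Nat → Bool) (n j : Nat) :
    (PySem.List.count ((List.range n).filter p) j ≠ 0) ↔ (j < n ∧ p j = true) := by
  rw [PySem.List.count_eq]
  rw [Ne, List.count_eq_zero]
  simp [List.mem_filter, List.mem_range]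

theorem pvG_nat (f : List String) (i : Nat) : pvG f (i : Int) = f.getD i "" := by
  simp [pvG, PySem.List.pyGet?_natCast, List.getD_eq_getElem?_getD]

theorem pv_mem_count (wordlist : List String) (x : String) :
    (PySem.List.count wordlist x ≠ 0) ↔ x ∈ wordlist := by
  rw [PySem.List.count_eq, Ne, List.count_eq_zero]
  simp

theorem pvCondF_succ (wordlist f : List String) (j : Nat) :
    pvCondF wordlist f (j+1) = true ↔ f.getD j "" ++ f.getD (j+1) "" ∈ wordlist := by
  have h1 : ((j+1 : Nat) : Int) - 1 = (j : Int) := by push_cast; ring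
  rw [pvCondF, h1, pvG_nat, pvG_nat, decide_eq_true_iff, pv_mem_count]

theorem pvCondM_succ (wordlist f : List String) (j : Nat) :
    pvCondM wordlist f (j+1) = true ↔
      (j + 2 < f.length ∧ ¬ (f.getD j "" ++ f.getD (j+1) "" ∈ wordlist) ∧
        f.getD j "" ++ f.getD (j+1) "" ++ f.getD (j+2) "" ∈ wordlist) := by
  have h1 : ((j+1 : Nat) : Int) - 1 = (j : Int) := by push_cast; ring
  have h2 : ((j+1 : Nat) : Int) + 1 = ((j+2 : Nat) : Int) := by push_cast; ring
  rw [pvCondM, h1, h2, pvG_nat, pvG_nat, pvG_nat]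
  simp only [Bool.and_eq_true, Bool.not_eq_true', decide_eq_true_iff]
  constructor
  · rintro ⟨⟨ha, hb⟩, hc⟩
    rw [Bool.eq_false_iff] at hb
    refine ⟨by omega, fun h => hb ((pvCondF_succ _ _ _).mpr h), (pv_mem_count _ _).mp hc⟩
  · rintro ⟨ha, hb, hc⟩
    refine ⟨⟨by omega, ?_⟩, (pv_mem_count _ _).mpr hc⟩
    rw [Bool.eq_false_iff]
    intro h
    exact hb ((pvCondF_succ _ _ _).mp h)

theorem pv_contains_ofList (wordlist : List String) (x : String) :
    PySem.Set.contains (PySem.Set.ofList wordlist) x = true ↔ x ∈ wordlist := by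
  rw [PySem.Set.contains_iff, PySem.Set.mem_ofList]

theorem pvMain (wordlist f : List String) :
    ∀ (m i : Nat) (res : String), i + m = f.length →
      ((List.range' i m).foldl
        (pvStep2 f ((List.range f.length).filter (pvCondF wordlist f))
                   ((List.range f.length).filter (pvCondM wordlist f))) (0, res)).2 =
      res ++ pvAltLoop (PySem.Set.ofList wordlist) f i := by
  intro m
  induction m using Nat.strong_induction_on with
  | _ m IH =>
    intro i res hm
    match m, hm with
    | 0, hm =>
      rw [pvAltLoop]
      simp [show ¬ i < f.length by omega]
    | Nat.succ k, hm =>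
      have hi : i < f.length := by omega
      rw [List.range'_succ, List.foldl_cons]
      have hfi := pv_count_filter_range (pvCondF wordlist f) f.length (i+1)
      have hmi := pv_count_filter_range (pvCondM wordlist f) f.length (i+1)
      by_cases h1 : i + 1 < f.length ∧ f.getD i "" ++ f.getD (i+1) "" ∈ wordlist
      · -- two-word merge
        have hcf : PySem.List.count ((List.range f.length).filter (pvCondF wordlist f)) (i+1) ≠ 0 :=
          hfi.mpr ⟨h1.1, (pvCondF_succ _ _ _).mpr h1.2⟩
        have hcm : ¬ PySem.List.count ((List.range f.length).filter (pvCondM wordlist f)) (i+1) ≠ 0 := by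
          intro h
          exact ((pvCondM_succ wordlist f i).mp (hmi.mp h).2).2.1 h1.2
        rw [pvStep2]
        simp only [if_neg (by decide : ¬((0:Nat) ≠ 0)), if_neg hcm, if_pos hcf]
        have hk : 1 ≤ k := by omega
        -- consume one skipped index
        obtain ⟨k', rfl⟩ : ∃ k', k = k' + 1 := ⟨k - 1, by omega⟩
        rw [List.range'_succ, List.foldl_cons, pvStep2]
        simp only [if_pos (by decide : (1 : Nat) ≠ 0)]
        rw [IH k' (by omega) (i+2) _ (by omega)]
        conv_rhs => rw [pvAltLoop]
        rw [if_pos hi,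
          if_pos (⟨h1.1, (pv_contains_ofList _ _).mpr h1.2⟩ :
            i + 1 < f.length ∧ PySem.Set.contains (PySem.Set.ofList wordlist) (f.getD i "" ++ f.getD (i+1) "") = true)]
        rw [show ((i : Int) + 1) = ((i+1 : Nat) : Int) by push_cast; ring, pvG_nat, pvG_nat]
        simp [String.append_assoc]
      · by_cases h2 : i + 2 < f.length ∧
            f.getD i "" ++ f.getD (i+1) "" ++ f.getD (i+2) "" ∈ wordlist
        · -- three-word merge
          have hpair : ¬ f.getD i "" ++ f.getD (i+1) "" ∈ wordlist := by
            intro h; exact h1 ⟨by omega, h⟩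
          have hcm : PySem.List.count ((List.range f.length).filter (pvCondM wordlist f)) (i+1) ≠ 0 :=
            hmi.mpr ⟨by omega, (pvCondM_succ _ _ _).mpr ⟨h2.1, hpair, h2.2⟩⟩
          rw [pvStep2]
          simp only [if_neg (by decide : ¬((0:Nat) ≠ 0)), if_pos hcm, if_pos h2.1]
          obtain ⟨k', rfl⟩ : ∃ k', k = k' + 2 := ⟨k - 2, by omega⟩
          rw [List.range'_succ, List.foldl_cons, pvStep2]
          simp only [if_pos (by decide : (2 : Nat) ≠ 0)]
          rw [List.range'_succ, List.foldl_cons, pvStep2]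
          simp only [if_pos (by decide : (2 - 1 : Nat) ≠ 0)]
          rw [show (2 - 1 - 1 : Nat) = 0 from rfl]
          rw [IH k' (by omega) (i+3) _ (by omega)]
          conv_rhs => rw [pvAltLoop]
          rw [if_pos hi, if_neg (show ¬(i + 1 < f.length ∧ PySem.Set.contains (PySem.Set.ofList wordlist) (f.getD i "" ++ f.getD (i+1) "") = true) from
            fun h => h1 ⟨h.1, (pv_contains_ofList _ _).mp h.2⟩),
            if_pos (⟨h2.1, (pv_contains_ofList _ _).mpr h2.2⟩ :
              i + 2 < f.length ∧ PySem.Set.contains (PySem.Set.ofList wordlist)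
                (f.getD i "" ++ f.getD (i+1) "" ++ f.getD (i+2) "") = true)]
          rw [show ((i : Int) + 1) = ((i+1 : Nat) : Int) by push_cast; ring,
            show ((i : Int) + 2) = ((i+2 : Nat) : Int) by push_cast; ring, pvG_nat, pvG_nat, pvG_nat]
          simp [String.append_assoc]
        · -- no merge
          have hcf : ¬ PySem.List.count ((List.range f.length).filter (pvCondF wordlist f)) (i+1) ≠ 0 := by
            intro h
            obtain ⟨hl, hp⟩ := hfi.mp h
            exact h1 ⟨hl, (pvCondF_succ _ _ _).mp hp⟩
          have hcm : ¬ PySem.List.count ((List.range f.length).filter (pvCondM wordlist f)) (i+1) ≠ 0 := by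
            intro h
            obtain ⟨hl, hp⟩ := hmi.mp h
            obtain ⟨ha, hb, hc⟩ := (pvCondM_succ _ _ _).mp hp
            exact h2 ⟨ha, hc⟩
          rw [pvStep2]
          simp only [if_neg (by decide : ¬((0:Nat) ≠ 0)), if_neg hcm, if_neg hcf]
          rw [IH k (by omega) (i+1) _ (by omega)]
          conv_rhs => rw [pvAltLoop]
          rw [if_pos hi, if_neg (show ¬(i + 1 < f.length ∧ PySem.Set.contains (PySem.Set.ofList wordlist) (f.getD i "" ++ f.getD (i+1) "") = true) from
            fun h => h1 ⟨h.1, (pv_contains_ofList _ _).mp h.2⟩),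
            if_neg (show ¬(i + 2 < f.length ∧ PySem.Set.contains (PySem.Set.ofList wordlist) (f.getD i "" ++ f.getD (i+1) "" ++ f.getD (i+2) "") = true) from
            fun h => h2 ⟨h.1, (pv_contains_ofList _ _).mp h.2⟩), pvG_nat]
          simp [String.append_assoc]

-- ===== VERDICT (by name: the statement is the Claim_ definition above) =====
theorem adjustBackSentence_spec : Claim_equal_adjustBackSentence := by
  intro wordlist finalstring _
  unfold Spec_adjustBackSentence adjustBackSentence adjustBackSentence_alt
  simp only [pvFold1_char wordlist _ _ [] []]
  have h := pvMain wordlist (pvSplit finalstring)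
    (pvSplit finalstring).length 0 "" (by omega)
  simpa [List.range_eq_range'] using h
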